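-- pv_equiv track=rewrite | github.com/JavaJZR/CBC-CleanUp-Tool | python_app/employee_cleanup_tool.py | is_valid_header
-- ===== SOURCE A (Python) =====
-- def is_valid_header(columns) -> bool:
--     """Check if columns look like valid headers by looking for expected keywords"""
--     column_names = [str(col).lower() for col in columns]
--
--     # Look for common employee data keywords
--     expected_keywords = [
--         'pernr', 'pers. number', 'employee number', 'emp number',
--         'full name', 'name', 'employee name', 'username',
--         'user id', 'userid', 'sysid', 'department', 'position',
--         'resignation', 'date', 'effectivity'
--     ]
--
--     # Count how many expected keywords are found
--     found_keywords = sum(1 for keyword in expected_keywords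
--                        if any(keyword in col for col in column_names))
--
--     # If we find at least 2 expected keywords, consider it a valid header
--     return found_keywords >= 2
-- ===== SOURCE B (Python) =====
-- def is_valid_header(columns) -> bool:
--     """Check if columns look like valid headers by looking for expected keywords"""
--     expected_keywords = [
--         'pernr', 'pers. number', 'employee number', 'emp number',
--         'full name', 'name', 'employee name', 'username',
--         'user id', 'userid', 'sysid', 'department', 'position',
--         'resignation', 'date', 'effectivity'
--     ]
--     # Flatten the columns into ONE newline-joined haystack string: since no
--     # keyword contains a newline, a keyword occurs in some column iff it occurs
--     # in the haystack, so each keyword needs a single substring search and the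
--     # inner scan over the column list disappears.
--     haystack = "\n".join(str(col).lower() for col in columns)
--     matches = [kw for kw in expected_keywords if kw in haystack]
--     return len(matches) >= 2
-- ===== Notes on version B (the rewrite author's own statement) =====
-- stated objective: faster
-- what changed: B joins all lowercased columns into one newline-separated haystack string and does a single substring search per keyword on it (correct because no keyword contains a newline), replacing A's nested any-scan over the column list per keyword.
import Mathlib
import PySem

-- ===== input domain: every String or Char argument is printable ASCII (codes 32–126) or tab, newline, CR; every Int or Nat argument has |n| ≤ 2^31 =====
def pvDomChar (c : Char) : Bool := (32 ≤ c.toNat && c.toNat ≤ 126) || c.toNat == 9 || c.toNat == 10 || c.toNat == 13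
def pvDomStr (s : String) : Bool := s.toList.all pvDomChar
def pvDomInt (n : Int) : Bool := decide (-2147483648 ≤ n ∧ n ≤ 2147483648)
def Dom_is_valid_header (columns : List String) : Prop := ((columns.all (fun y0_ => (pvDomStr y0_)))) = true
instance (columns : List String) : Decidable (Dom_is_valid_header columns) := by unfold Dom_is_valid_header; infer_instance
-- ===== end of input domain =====

-- B flattens the columns into one newline-joined haystack and does a single substring
-- search per keyword on it (valid since no keyword contains a newline), instead of A's
-- per-keyword any-scan over the column list (alternative algorithm, same cost class).


-- shared constant data (the fixed keyword list both Pythons spell out)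
def expected_keywords : List String :=
  ["pernr", "pers. number", "employee number", "emp number",
   "full name", "name", "employee name", "username",
   "user id", "userid", "sysid", "department", "position",
   "resignation", "date", "effectivity"]

-- ===== PORT A =====
def is_valid_header (columns : List String) : Bool :=
  let column_names := columns.map (fun col => PySem.Str.lower col)
  let found_keywords : Int :=
    expected_keywords.foldl
      (fun acc keyword =>
        if column_names.any (fun col => PySem.Str.isIn keyword col) then acc + 1 else acc)
      0
  decide (2 ≤ found_keywords)

-- ===== PORT B =====
def is_valid_header_alt (columns : List String) : Bool :=
  let haystack := PySem.Str.join "\n" (columns.map (fun col => PySem.Str.lower col))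
  let found := expected_keywords.filter (fun kw => PySem.Str.isIn kw haystack)
  decide (2 ≤ found.length)

-- ===== PRECONDITION & SPEC =====
def Spec_is_valid_header (columns : List String) (out : Bool) : Prop := out = is_valid_header_alt columns
instance (columns : List String) (out : Bool) : Decidable (Spec_is_valid_header columns out) := by unfold Spec_is_valid_header; infer_instance

-- ===== CLAIM =====
def Claim_equal_is_valid_header : Prop := ∀ (columns : List String), Dom_is_valid_header columns → Spec_is_valid_header columns (is_valid_header columns)

-- ===== LEMMAS AND PROOFS =====

-- a prefix of a ++ c :: b that avoids c is a prefix of a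
theorem prefix_avoid_sep {kw a b : List Char} {c : Char}
    (hc : c ∉ kw) (h : kw <+: a ++ c :: b) : kw <+: a := by
  induction kw generalizing a with
  | nil => exact List.nil_prefix
  | cons k kw' ih =>
    cases a with
    | nil =>
      rcases List.cons_prefix_cons.mp h with ⟨rfl, _⟩
      exact absurd (List.mem_cons_self) hc
    | cons x a' =>
      rcases List.cons_prefix_cons.mp h with ⟨rfl, h'⟩
      exact List.cons_prefix_cons.mpr ⟨rfl, ih (fun m => hc (List.mem_cons_of_mem _ m)) h'⟩

-- an infix of a ++ c :: b that avoids c lies in a or in b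
theorem infix_append_sep {kw : List Char} {c : Char} (hc : c ∉ kw) :
    ∀ a b : List Char, kw <:+: a ++ c :: b ↔ kw <:+: a ∨ kw <:+: b := by
  intro a b
  induction a with
  | nil =>
    simp only [List.nil_append]
    rw [List.infix_cons_iff]
    constructor
    · rintro (hp | hi)
      · have := prefix_avoid_sep (a := []) hc hp
        simp at this; subst this
        exact Or.inl (List.nil_infix)
      · exact Or.inr hi
    · rintro (hi | hi)
      · rw [List.infix_nil] at hi; subst hi; exact Or.inl List.nil_prefix
      · exact Or.inr hi
  | cons x a' ih =>
    rw [List.cons_append, List.infix_cons_iff]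
    constructor
    · rintro (hp | hi)
      · exact Or.inl (prefix_avoid_sep hc hp).isInfix
      · rcases ih.mp hi with h | h
        · exact Or.inl (h.trans (List.suffix_cons x a').isInfix)
        · exact Or.inr h
    · rintro (hi | hi)
      · rw [List.infix_cons_iff] at hi
        rcases hi with hp | hi
        · exact Or.inl (hp.trans (List.cons_prefix_cons.mpr ⟨rfl, List.prefix_append _ _⟩))
        · exact Or.inr (ih.mpr (Or.inl hi))
      · exact Or.inr (ih.mpr (Or.inr hi))

-- a nonempty, separator-free word is an infix of the joined text iff of some part
theorem infix_join_iff {kw : List Char} {c : Char}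
    (hne : kw ≠ []) (hc : c ∉ kw) :
    ∀ parts : List (List Char),
      kw <:+: PySem.Chars.join [c] parts ↔ ∃ p ∈ parts, kw <:+: p := by
  intro parts
  induction parts with
  | nil =>
    rw [PySem.Chars.join_nil]
    simp [List.infix_nil, hne]
  | cons p rest ih =>
    cases rest with
    | nil =>
      rw [PySem.Chars.join_singleton]
      simp
    | cons q rest' =>
      rw [PySem.Chars.join_cons_cons]
      have : p ++ [c] ++ PySem.Chars.join [c] (q :: rest')
          = p ++ c :: PySem.Chars.join [c] (q :: rest') := by simp
      rw [this, infix_append_sep hc, ih]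
      constructor
      · rintro (h | ⟨r, hr, h⟩)
        · exact ⟨p, List.mem_cons_self, h⟩
        · exact ⟨r, List.mem_cons_of_mem _ hr, h⟩
      · rintro ⟨r, hr, h⟩
        rcases List.mem_cons.mp hr with rfl | hr
        · exact Or.inl h
        · exact Or.inr ⟨r, hr, h⟩

-- every keyword is nonempty and newline-free
theorem keywords_sep_free :
    ∀ kw ∈ expected_keywords, kw.toList ≠ [] ∧ '\n' ∉ kw.toList := by decide

-- per keyword: one search in the joined haystack = the any-scan over the columns
theorem isIn_haystack (columns : List String) (kw : String)
    (hkw : kw ∈ expected_keywords) :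
    PySem.Str.isIn kw (PySem.Str.join "\n" (columns.map (fun col => PySem.Str.lower col)))
      = (columns.map (fun col => PySem.Str.lower col)).any
          (fun col => PySem.Str.isIn kw col) := by
  obtain ⟨hne, hc⟩ := keywords_sep_free kw hkw
  rw [Bool.eq_iff_iff, PySem.Str.isIn_iff_infix, PySem.Str.toList_join, List.any_eq_true]
  have hsep : ("\n" : String).toList = ['\n'] := by decide
  rw [hsep, infix_join_iff hne hc]
  constructor
  · rintro ⟨p, hp, h⟩
    rcases List.mem_map.mp hp with ⟨s, hs, rfl⟩
    exact ⟨s, hs, (PySem.Str.isIn_iff_infix _ _).mpr h⟩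
  · rintro ⟨s, hs, h⟩
    exact ⟨s.toList, List.mem_map.mpr ⟨s, hs, rfl⟩, (PySem.Str.isIn_iff_infix _ _).mp h⟩

-- ===== VERDICT =====
theorem is_valid_header_spec : Claim_equal_is_valid_header := by
  intro columns _
  unfold Spec_is_valid_header is_valid_header is_valid_header_alt
  simp only []
  rw [PySem.List.foldl_if_add_one, zero_add]
  have hfilter :
      expected_keywords.filter
          (fun kw => PySem.Str.isIn kw
            (PySem.Str.join "\n" (columns.map (fun col => PySem.Str.lower col))))
        = expected_keywords.filter
          (fun keyword => (columns.map (fun col => PySem.Str.lower col)).any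
            (fun col => PySem.Str.isIn keyword col)) := by
    apply List.filter_congr
    intro kw hkw
    exact isIn_haystack columns kw hkw
  rw [hfilter, decide_eq_decide, List.countP_eq_length_filter]
  exact_mod_cast Iff.rfl
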